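-- pv_equiv track=rewrite | github.com/matinatula/Final-Recommendation-System | load_real_lastfm_data.py | emotion_from_tags
-- ===== SOURCE A (Python) =====
-- def emotion_from_tags(tags):
--     """
--     Guess emotion from Last.fm tags.
--
--     Args:
--         tags: List of tag names
--
--     Returns:
--         Emotion string
--     """
--     tags_lower = [t.lower() for t in tags]
--
--     # Map tags to emotions
--     if any(word in tags_lower for word in ['sad', 'melancholy', 'depressing', 'melancholic']):
--         return 'sad'
--     elif any(word in tags_lower for word in ['happy', 'upbeat', 'cheerful', 'fun', 'party']):
--         return 'happy'
--     elif any(word in tags_lower for word in ['angry', 'aggressive', 'intense', 'metal', 'hardcore']):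
--         return 'angry'
--     elif any(word in tags_lower for word in ['dark', 'ominous', 'scary', 'horror', 'haunting']):
--         return 'fear'
--     else:
--         return 'neutral'
-- ===== SOURCE B (Python) =====
-- # B: one pass over tags; each tag's lowercase is mapped to a priority (0=sad,1=happy,2=angry,3=fear);
-- # the minimum priority seen wins, 'neutral' if no tag matches.
-- _EMOTIONS = ['sad', 'happy', 'angry', 'fear']
-- _WORDS = [
--     ['sad', 'melancholy', 'depressing', 'melancholic'],
--     ['happy', 'upbeat', 'cheerful', 'fun', 'party'],
--     ['angry', 'aggressive', 'intense', 'metal', 'hardcore'],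
--     ['dark', 'ominous', 'scary', 'horror', 'haunting'],
-- ]
--
--
-- def _prio(word):
--     for i, ws in enumerate(_WORDS):
--         if word in ws:
--             return i
--     return None
--
--
-- def emotion_from_tags(tags):
--     best = None
--     for t in tags:
--         p = _prio(t.lower())
--         if p is not None and (best is None or p < best):
--             best = p
--     return 'neutral' if best is None else _EMOTIONS[best]
-- ===== Notes on version B (the rewrite author's own statement) =====
-- stated objective: alternative
-- what changed: Replaces A's four sequential any-membership scans over the whole lowered tag list by a single pass over the tags that maps each lowered tag to an emotion priority index and keeps the minimum, rendering the emotion (or 'neutral') at the end.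
import Mathlib
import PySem

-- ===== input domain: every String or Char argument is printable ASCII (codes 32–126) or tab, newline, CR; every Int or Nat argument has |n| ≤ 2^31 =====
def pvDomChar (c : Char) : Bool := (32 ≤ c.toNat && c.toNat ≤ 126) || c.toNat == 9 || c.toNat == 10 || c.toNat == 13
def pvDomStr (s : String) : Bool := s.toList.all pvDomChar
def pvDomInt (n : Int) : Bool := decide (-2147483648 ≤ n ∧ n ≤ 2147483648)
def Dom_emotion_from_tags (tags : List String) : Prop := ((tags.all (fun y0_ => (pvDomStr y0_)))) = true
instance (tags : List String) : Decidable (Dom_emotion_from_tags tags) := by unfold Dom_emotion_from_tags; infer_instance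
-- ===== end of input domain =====

-- B replaces A's four sequential any-membership scans over the lowered tag list by a single pass
-- over the tags keeping the minimum emotion-priority index (alternative decomposition, same cost).

-- ===== PORT A =====
def emotion_from_tags (tags : List String) : String :=
  let tags_lower := tags.map PySem.Str.lower
  if (["sad", "melancholy", "depressing", "melancholic"] : List String).any
      (fun word => tags_lower.contains word) then "sad"
  else if (["happy", "upbeat", "cheerful", "fun", "party"] : List String).any
      (fun word => tags_lower.contains word) then "happy"
  else if (["angry", "aggressive", "intense", "metal", "hardcore"] : List String).any
      (fun word => tags_lower.contains word) then "angry"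
  else if (["dark", "ominous", "scary", "horror", "haunting"] : List String).any
      (fun word => tags_lower.contains word) then "fear"
  else "neutral"

-- ===== PORT B =====
def pvEmotions : List String := ["sad", "happy", "angry", "fear"]

def pvWords : List (List String) :=
  [["sad", "melancholy", "depressing", "melancholic"],
   ["happy", "upbeat", "cheerful", "fun", "party"],
   ["angry", "aggressive", "intense", "metal", "hardcore"],
   ["dark", "ominous", "scary", "horror", "haunting"]]

-- port of _prio: first index i with word ∈ _WORDS[i], else None
def pvPrio (word : String) : Option Int :=
  ((PySem.List.enumerate pvWords).find? (fun p => p.2.contains word)).map (fun p => p.1)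

def emotion_from_tags_alt (tags : List String) : String :=
  let best := tags.foldl (fun best t =>
    match pvPrio (PySem.Str.lower t) with
    | none => best
    | some p =>
      match best with
      | none => some p
      | some b => if p < b then some p else best) (none : Option Int)
  match best with
  | none => "neutral"
  | some b => (PySem.List.pyGet? pvEmotions b).getD "neutral"  -- the index is always in range (0..3)

-- ===== PRECONDITION & SPEC =====
def Spec_emotion_from_tags (tags : List String) (out : String) : Prop := out = emotion_from_tags_alt tags
instance (tags : List String) (out : String) : Decidable (Spec_emotion_from_tags tags out) := by unfold Spec_emotion_from_tags; infer_instance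

-- ===== CLAIM (what is proved, stated in full; the proofs are below) =====
def Claim_equal_emotion_from_tags : Prop := ∀ (tags : List String), Dom_emotion_from_tags tags → Spec_emotion_from_tags tags (emotion_from_tags tags)

-- ===== LEMMAS AND PROOFS =====

-- the per-tag priority B computes
def pvPr (t : String) : Option Int := pvPrio (PySem.Str.lower t)

theorem pvEnum_eq : PySem.List.enumerate pvWords =
    [(0, ["sad", "melancholy", "depressing", "melancholic"]),
     (1, ["happy", "upbeat", "cheerful", "fun", "party"]),
     (2, ["angry", "aggressive", "intense", "metal", "hardcore"]),
     (3, ["dark", "ominous", "scary", "horror", "haunting"])] := by decide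

theorem pvPrio_eq_some (s : String) (k : Int) : pvPrio s = some k ↔
    (k = 0 ∧ s ∈ (["sad", "melancholy", "depressing", "melancholic"] : List String)) ∨
    (k = 1 ∧ s ∈ (["happy", "upbeat", "cheerful", "fun", "party"] : List String)) ∨
    (k = 2 ∧ s ∈ (["angry", "aggressive", "intense", "metal", "hardcore"] : List String)) ∨
    (k = 3 ∧ s ∈ (["dark", "ominous", "scary", "horror", "haunting"] : List String)) := by
  by_cases hall : s ∈ (["sad", "melancholy", "depressing", "melancholic",
      "happy", "upbeat", "cheerful", "fun", "party",
      "angry", "aggressive", "intense", "metal", "hardcore",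
      "dark", "ominous", "scary", "horror", "haunting"] : List String)
  · simp only [List.mem_cons, List.not_mem_nil, or_false] at hall
    rcases hall with rfl|rfl|rfl|rfl|rfl|rfl|rfl|rfl|rfl|rfl|rfl|rfl|rfl|rfl|rfl|rfl|rfl|rfl|rfl <;>
      simp [pvPrio, pvEnum_eq, List.find?] <;> omega
  · simp only [List.mem_cons, List.not_mem_nil, or_false, not_or] at hall
    obtain ⟨h1,h2,h3,h4,h5,h6,h7,h8,h9,h10,h11,h12,h13,h14,h15,h16,h17,h18,h19⟩ := hall
    simp [pvPrio, pvEnum_eq, List.find?, List.contains_eq_mem,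
      h1,h2,h3,h4,h5,h6,h7,h8,h9,h10,h11,h12,h13,h14,h15,h16,h17,h18,h19]

theorem pvPr_none (t : String) : pvPr t = none ↔
    PySem.Str.lower t ∉ (["sad", "melancholy", "depressing", "melancholic"] : List String) ∧
    PySem.Str.lower t ∉ (["happy", "upbeat", "cheerful", "fun", "party"] : List String) ∧
    PySem.Str.lower t ∉ (["angry", "aggressive", "intense", "metal", "hardcore"] : List String) ∧
    PySem.Str.lower t ∉ (["dark", "ominous", "scary", "horror", "haunting"] : List String) := by
  rw [pvPr, Option.eq_none_iff_forall_ne_some]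
  constructor
  · intro h
    refine ⟨fun hm => h 0 ?_, fun hm => h 1 ?_, fun hm => h 2 ?_, fun hm => h 3 ?_⟩ <;>
      rw [pvPrio_eq_some] <;> simp [hm]
  · rintro ⟨n0, n1, n2, n3⟩ k hk
    rcases (pvPrio_eq_some _ k).mp hk with ⟨_, hm⟩|⟨_, hm⟩|⟨_, hm⟩|⟨_, hm⟩ <;>
      [exact n0 hm; exact n1 hm; exact n2 hm; exact n3 hm]

theorem pvPr_some (t : String) (j : Int) (hj : pvPr t = some j) :
    j = 0 ∨ j = 1 ∨ j = 2 ∨ j = 3 := by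
  rcases (pvPrio_eq_some _ j).mp hj with ⟨h, _⟩|⟨h, _⟩|⟨h, _⟩|⟨h, _⟩ <;> omega

theorem pvPr_some0 (t : String) : pvPr t = some 0 ↔
    PySem.Str.lower t ∈ (["sad", "melancholy", "depressing", "melancholic"] : List String) := by
  rw [pvPr, pvPrio_eq_some]; simp

theorem pvPr_some1 (t : String) : pvPr t = some 1 ↔
    PySem.Str.lower t ∈ (["happy", "upbeat", "cheerful", "fun", "party"] : List String) := by
  rw [pvPr, pvPrio_eq_some]; simp

theorem pvPr_some2 (t : String) : pvPr t = some 2 ↔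
    PySem.Str.lower t ∈ (["angry", "aggressive", "intense", "metal", "hardcore"] : List String) := by
  rw [pvPr, pvPrio_eq_some]; simp

theorem pvPr_some3 (t : String) : pvPr t = some 3 ↔
    PySem.Str.lower t ∈ (["dark", "ominous", "scary", "horror", "haunting"] : List String) := by
  rw [pvPr, pvPrio_eq_some]; simp

-- the fold's combining operation is an option-min
def pvOmin (a b : Option Int) : Option Int :=
  match a, b with
  | none, b => b
  | a, none => a
  | some x, some y => some (min x y)

theorem pvOmin_assoc (a b c : Option Int) : pvOmin (pvOmin a b) c = pvOmin a (pvOmin b c) := by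
  cases a <;> cases b <;> cases c <;> simp [pvOmin, min_assoc]

-- the fold over the tags, rewritten through pvOmin
def pvM (ts : List String) : Option Int :=
  ts.foldl (fun b t => pvOmin b (pvPr t)) none

theorem pvStep_eq_omin : (fun (best : Option Int) (t : String) =>
    (match pvPrio (PySem.Str.lower t) with
     | none => best
     | some p =>
       match best with
       | none => some p
       | some b => if p < b then some p else best)) = fun b t => pvOmin b (pvPr t) := by
  funext b t
  show _ = pvOmin b (pvPrio (PySem.Str.lower t))
  cases h : pvPrio (PySem.Str.lower t) <;> cases b <;> simp [pvOmin, min_def] <;> split_ifs <;> simp <;> omega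

theorem alt_eq (tags : List String) : emotion_from_tags_alt tags =
    match pvM tags with
    | none => "neutral"
    | some b => (PySem.List.pyGet? pvEmotions b).getD "neutral" := by
  unfold emotion_from_tags_alt
  rw [pvStep_eq_omin]
  rfl

theorem pvFoldl_omin (ts : List String) (a b : Option Int) :
    ts.foldl (fun x t => pvOmin x (pvPr t)) (pvOmin a b) =
    pvOmin a (ts.foldl (fun x t => pvOmin x (pvPr t)) b) := by
  induction ts generalizing b with
  | nil => rfl
  | cons t ts ih => simp only [List.foldl_cons, pvOmin_assoc, ih]

theorem pvM_cons (t : String) (ts : List String) : pvM (t :: ts) = pvOmin (pvPr t) (pvM ts) := by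
  show List.foldl _ (pvOmin none (pvPr t)) ts = _
  have h : pvOmin none (pvPr t) = pvOmin (pvPr t) none := by cases pvPr t <;> rfl
  rw [h, pvFoldl_omin]
  rfl

theorem pvM_eq_none (ts : List String) : pvM ts = none ↔ ∀ t ∈ ts, pvPr t = none := by
  induction ts with
  | nil => simp [pvM]
  | cons t ts ih =>
    rw [pvM_cons]
    cases h : pvPr t <;> cases h2 : pvM ts <;> simp_all [pvOmin]

theorem pvM_eq_some (ts : List String) (k : Int) : pvM ts = some k →
    (∃ t ∈ ts, pvPr t = some k) ∧ ∀ t ∈ ts, ∀ j, pvPr t = some j → k ≤ j := by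
  induction ts generalizing k with
  | nil => simp [pvM]
  | cons t ts ih =>
    rw [pvM_cons]
    cases h : pvPr t <;> cases h2 : pvM ts <;> intro hk
    · simp [pvOmin] at hk
    · simp only [pvOmin, Option.some.injEq] at hk
      subst hk
      obtain ⟨⟨u, hu, hpu⟩, hmin⟩ := ih _ h2
      refine ⟨⟨u, by simp [hu], hpu⟩, ?_⟩
      intro x hx j hj
      rcases List.mem_cons.mp hx with rfl | hx
      · rw [h] at hj; exact absurd hj (by simp)
      · exact hmin x hx j hj
    · simp only [pvOmin, Option.some.injEq] at hk
      subst hk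
      refine ⟨⟨t, by simp, h⟩, ?_⟩
      intro x hx j hj
      rcases List.mem_cons.mp hx with rfl | hx
      · rw [h, Option.some.injEq] at hj; omega
      · rw [(pvM_eq_none ts).mp h2 x hx] at hj; exact absurd hj (by simp)
    · rename_i v1 v2
      simp only [pvOmin, Option.some.injEq] at hk
      obtain ⟨⟨u, hu, hpu⟩, hmin⟩ := ih _ h2
      constructor
      · by_cases hle : v1 ≤ v2
        · exact ⟨t, by simp, by rw [h, Option.some.injEq]; omega⟩
        · exact ⟨u, by simp [hu], by rw [hpu, Option.some.injEq]; omega⟩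
      · intro x hx j hj
        rcases List.mem_cons.mp hx with rfl | hx
        · rw [h, Option.some.injEq] at hj; omega
        · have := hmin x hx j hj; omega

-- A's j-th condition holds iff some tag has priority j
theorem pvAny_iff (tags ws : List String) :
    (ws.any (fun w => (tags.map PySem.Str.lower).contains w) = true) ↔
    ∃ t ∈ tags, PySem.Str.lower t ∈ ws := by
  simp only [List.any_eq_true, List.contains_eq_mem, decide_eq_true_eq, List.mem_map]
  constructor
  · rintro ⟨w, hw, t, ht, rfl⟩; exact ⟨t, ht, hw⟩
  · rintro ⟨t, ht, hw⟩; exact ⟨_, hw, t, ht, rfl⟩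

theorem pvM_eq_some_of (tags : List String) (j : Int)
    (hwit : ∃ t ∈ tags, pvPr t = some j)
    (hlow : ∀ t ∈ tags, ∀ i, pvPr t = some i → j ≤ i) : pvM tags = some j := by
  cases hm : pvM tags with
  | none =>
    obtain ⟨t, ht, hp⟩ := hwit
    rw [(pvM_eq_none tags).mp hm t ht] at hp
    exact absurd hp (by simp)
  | some k =>
    obtain ⟨⟨u, hu, hpu⟩, hmin⟩ := pvM_eq_some tags k hm
    obtain ⟨t, ht, hp⟩ := hwit
    have h1 := hmin t ht j hp
    have h2 := hlow u hu k hpu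
    congr 1
    omega

theorem emotion_main (tags : List String) : emotion_from_tags tags = emotion_from_tags_alt tags := by
  rw [alt_eq]
  simp only [emotion_from_tags]
  by_cases c0 : (["sad", "melancholy", "depressing", "melancholic"] : List String).any
      (fun word => (tags.map PySem.Str.lower).contains word) = true
  · obtain ⟨t, ht, hm⟩ := (pvAny_iff tags _).mp c0
    have hp : pvPr t = some 0 := by rw [pvPr_some0]; exact hm
    have : pvM tags = some 0 := pvM_eq_some_of tags 0 ⟨t, ht, hp⟩ (by
      intro x _ i hi
      rcases pvPr_some x i hi with rfl|rfl|rfl|rfl <;> omega)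
    rw [if_pos c0, this]
    decide
  · by_cases c1 : (["happy", "upbeat", "cheerful", "fun", "party"] : List String).any
        (fun word => (tags.map PySem.Str.lower).contains word) = true
    · obtain ⟨t, ht, hm⟩ := (pvAny_iff tags _).mp c1
      have hp : pvPr t = some 1 := by rw [pvPr_some1]; exact hm
      have h0 : ∀ x ∈ tags, pvPr x ≠ some 0 := by
        intro x hx hc
        exact c0 ((pvAny_iff tags _).mpr ⟨x, hx, by
          exact (pvPr_some0 x).mp hc⟩)
      have : pvM tags = some 1 := pvM_eq_some_of tags 1 ⟨t, ht, hp⟩ (by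
        intro x hx i hi
        rcases pvPr_some x i hi with rfl|rfl|rfl|rfl
        · exact absurd hi (h0 x hx)
        all_goals omega)
      rw [if_neg c0, if_pos c1, this]
      decide
    · by_cases c2 : (["angry", "aggressive", "intense", "metal", "hardcore"] : List String).any
          (fun word => (tags.map PySem.Str.lower).contains word) = true
      · obtain ⟨t, ht, hm⟩ := (pvAny_iff tags _).mp c2
        have hp : pvPr t = some 2 := by rw [pvPr_some2]; exact hm
        have h0 : ∀ x ∈ tags, pvPr x ≠ some 0 := by
          intro x hx hc
          exact c0 ((pvAny_iff tags _).mpr ⟨x, hx, by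
            exact (pvPr_some0 x).mp hc⟩)
        have h1 : ∀ x ∈ tags, pvPr x ≠ some 1 := by
          intro x hx hc
          exact c1 ((pvAny_iff tags _).mpr ⟨x, hx, by
            exact (pvPr_some1 x).mp hc⟩)
        have : pvM tags = some 2 := pvM_eq_some_of tags 2 ⟨t, ht, hp⟩ (by
          intro x hx i hi
          rcases pvPr_some x i hi with rfl|rfl|rfl|rfl
          · exact absurd hi (h0 x hx)
          · exact absurd hi (h1 x hx)
          all_goals omega)
        rw [if_neg c0, if_neg c1, if_pos c2, this]
        decide
      · by_cases c3 : (["dark", "ominous", "scary", "horror", "haunting"] : List String).any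
            (fun word => (tags.map PySem.Str.lower).contains word) = true
        · obtain ⟨t, ht, hm⟩ := (pvAny_iff tags _).mp c3
          have hp : pvPr t = some 3 := by rw [pvPr_some3]; exact hm
          have h0 : ∀ x ∈ tags, pvPr x ≠ some 0 := by
            intro x hx hc
            exact c0 ((pvAny_iff tags _).mpr ⟨x, hx, by
              exact (pvPr_some0 x).mp hc⟩)
          have h1 : ∀ x ∈ tags, pvPr x ≠ some 1 := by
            intro x hx hc
            exact c1 ((pvAny_iff tags _).mpr ⟨x, hx, by
              exact (pvPr_some1 x).mp hc⟩)
          have h2 : ∀ x ∈ tags, pvPr x ≠ some 2 := by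
            intro x hx hc
            exact c2 ((pvAny_iff tags _).mpr ⟨x, hx, by
              exact (pvPr_some2 x).mp hc⟩)
          have : pvM tags = some 3 := pvM_eq_some_of tags 3 ⟨t, ht, hp⟩ (by
            intro x hx i hi
            rcases pvPr_some x i hi with rfl|rfl|rfl|rfl
            · exact absurd hi (h0 x hx)
            · exact absurd hi (h1 x hx)
            · exact absurd hi (h2 x hx)
            · omega)
          rw [if_neg c0, if_neg c1, if_neg c2, if_pos c3, this]
          decide
        · have hall : ∀ t ∈ tags, pvPr t = none := by
            intro t ht
            rw [pvPr_none]
            refine ⟨?_, ?_, ?_, ?_⟩ <;> intro hm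
            · exact c0 ((pvAny_iff tags _).mpr ⟨t, ht, hm⟩)
            · exact c1 ((pvAny_iff tags _).mpr ⟨t, ht, hm⟩)
            · exact c2 ((pvAny_iff tags _).mpr ⟨t, ht, hm⟩)
            · exact c3 ((pvAny_iff tags _).mpr ⟨t, ht, hm⟩)
          have : pvM tags = none := (pvM_eq_none tags).mpr hall
          rw [if_neg c0, if_neg c1, if_neg c2, if_neg c3, this]

-- ===== VERDICT (by name: the statement is the Claim_ definition above) =====
theorem emotion_from_tags_spec : Claim_equal_emotion_from_tags := by
  intro tags _
  unfold Spec_emotion_from_tags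
  exact emotion_main tags
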